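-- pv_equiv track=rewrite | github.com/the-ai-entrepreneur-ai-hub/domain-scout-cli | src/legal_navigation.py | detect_country_from_domain
-- ===== SOURCE A (Python) =====
-- def detect_country_from_domain(domain: str) -> str:
--     """Detect likely country from TLD for targeted keyword selection."""
--     tld_map = {
--         '.de': 'german', '.at': 'german', '.ch': 'german',
--         '.co.uk': 'english', '.uk': 'english',
--         '.fr': 'french', '.be': 'french',
--         '.es': 'spanish', '.it': 'italian',
--     }
--
--     domain_lower = domain.lower()
--     for tld, country in tld_map.items():
--         if domain_lower.endswith(tld):
--             return country
--
--     return 'english'  # Default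
-- ===== SOURCE B (Python) =====
-- _TLD3 = {'.de': 'german', '.at': 'german', '.ch': 'german',
--          '.uk': 'english', '.fr': 'french', '.be': 'french',
--          '.es': 'spanish', '.it': 'italian'}
--
-- def detect_country_from_domain(domain: str) -> str:
--     """Detect likely country from TLD for targeted keyword selection."""
--     s = domain.lower()
--     if s[-6:] == '.co.uk':
--         return 'english'
--     return _TLD3.get(s[-3:], 'english')
-- ===== Notes on version B (the rewrite author's own statement) =====
-- stated objective: alternative
-- what changed: B replaces A's ordered scan over all nine tld_map entries with repeated endswith calls by two O(1) operations: one equality check of the last-6-character slice against '.co.uk' and a dict lookup keyed on the last-3-character slice (all other keys have length 3), defaulting to 'english'.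
import Mathlib
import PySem

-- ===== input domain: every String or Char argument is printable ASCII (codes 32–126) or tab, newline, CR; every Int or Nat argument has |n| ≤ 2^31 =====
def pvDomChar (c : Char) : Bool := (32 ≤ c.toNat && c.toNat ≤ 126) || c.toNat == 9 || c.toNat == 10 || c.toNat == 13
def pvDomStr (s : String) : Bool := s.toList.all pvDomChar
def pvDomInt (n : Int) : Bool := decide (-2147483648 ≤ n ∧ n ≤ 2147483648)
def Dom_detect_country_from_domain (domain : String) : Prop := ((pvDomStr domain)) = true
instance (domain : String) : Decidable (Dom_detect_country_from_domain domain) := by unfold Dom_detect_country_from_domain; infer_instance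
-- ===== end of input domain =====

-- B replaces A's linear scan of the tld map with endswith by one length-6 suffix check plus a
-- dict lookup keyed on the last 3 characters (objective: simpler/alternative; same return values).

-- ===== PORT A =====
-- the dict literal tld_map, in Python insertion order (keys are distinct)
def pvTldMap : List (String × String) :=
  [(".de", "german"), (".at", "german"), (".ch", "german"),
   (".co.uk", "english"), (".uk", "english"),
   (".fr", "french"), (".be", "french"),
   (".es", "spanish"), (".it", "italian")]

-- the 'for tld, country in tld_map.items(): if domain_lower.endswith(tld): return country' loop
def pvScan (dl : List Char) : List (String × String) → String
  | [] => "english"  -- the default after the loop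
  | (tld, country) :: rest =>
      if PySem.Chars.endswith dl tld.toList then country else pvScan dl rest

def detect_country_from_domain (domain : String) : String :=
  pvScan (PySem.Chars.lower domain.toList) pvTldMap

-- ===== PORT B =====
-- the module-level dict _TLD3 (literal with distinct keys, so PySem.Dict.mk is its value)
def pvTld3 : PySem.Dict (List Char) String := PySem.Dict.mk
  [(".de".toList, "german"), (".at".toList, "german"), (".ch".toList, "german"),
   (".uk".toList, "english"), (".fr".toList, "french"), (".be".toList, "french"),
   (".es".toList, "spanish"), (".it".toList, "italian")]

def detect_country_from_domain_alt (domain : String) : String :=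
  let s := PySem.Chars.lower domain.toList
  if PySem.List.slice s (some (-6)) none == ".co.uk".toList then "english"
  else pvTld3.getD (PySem.List.slice s (some (-3)) none) "english"

-- ===== PRECONDITION & SPEC =====
def Spec_detect_country_from_domain (domain : String) (out : String) : Prop := out = detect_country_from_domain_alt domain
instance (domain : String) (out : String) : Decidable (Spec_detect_country_from_domain domain out) := by unfold Spec_detect_country_from_domain; infer_instance

-- ===== CLAIM (what is proved, stated in full; the proofs are below) =====
def Claim_equal_detect_country_from_domain : Prop := ∀ (domain : String), Dom_detect_country_from_domain domain → Spec_detect_country_from_domain domain (detect_country_from_domain domain)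

-- ===== LEMMAS AND PROOFS =====

-- endswith as a comparison of the trailing slice (both sides Bool)
theorem pv_ends_drop (t l : List Char) :
    PySem.Chars.endswith l t = (l.drop (l.length - t.length) == t) := by
  rw [Bool.eq_iff_iff, beq_iff_eq, PySem.Chars.endswith_iff]
  constructor
  · rintro ⟨u, rfl⟩; simp
  · intro h
    refine ⟨l.take (l.length - t.length), ?_⟩
    conv_rhs => rw [← List.take_append_drop (l.length - t.length) l]
    rw [h]


-- _TLD3.get(k, 'english') written out as the first-match chain over the dict's items
set_option maxHeartbeats 1000000 in
theorem pv_getD_chain (k : List Char) :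
    pvTld3.getD k "english" =
      (if k = ".de".toList then "german" else if k = ".at".toList then "german"
       else if k = ".ch".toList then "german" else if k = ".uk".toList then "english"
       else if k = ".fr".toList then "french" else if k = ".be".toList then "french"
       else if k = ".es".toList then "spanish" else if k = ".it".toList then "italian"
       else "english") := by
  simp only [pvTld3, PySem.Dict.getD, PySem.Dict.get?_mk_cons, beq_iff_eq]
  split_ifs <;> subst_vars <;> simp_all [PySem.Dict.get?]

-- ===== VERDICT (by name: the statement is the Claim_ definition above) =====
theorem detect_country_from_domain_spec : Claim_equal_detect_country_from_domain := by
  intro domain _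
  unfold Spec_detect_country_from_domain detect_country_from_domain detect_country_from_domain_alt
  generalize (PySem.Chars.lower domain.toList) = l
  dsimp only
  rw [PySem.List.slice_from_neg_ofNat l 6 (by omega),
      PySem.List.slice_from_neg_ofNat l 3 (by omega),
      pv_getD_chain]
  simp only [pvScan, pvTldMap, pv_ends_drop]
  by_cases h6 : l.drop (l.length - 6) = ['.', 'c', 'o', '.', 'u', 'k']
  · have hlen : 6 ≤ l.length := by
      have := congrArg List.length h6
      simp [List.length_drop] at this
      omega
    have h3 : l.drop (l.length - 3) = ['.', 'u', 'k'] := by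
      have e : List.drop 3 (List.drop (l.length - 6) l) = List.drop (l.length - 3) l := by
        rw [List.drop_drop]; congr 1; omega
      rw [← e, h6]
      decide
    simp [h6, h3]
  · simp [h6]; rfl
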